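-- pv_equiv track=rewrite | github.com/ashildskalnes/webviz-4d | qc/check_sumo_production_data.py | get_short_wellname
-- ===== SOURCE A (Python) =====
-- def get_short_wellname(wellname):
--     """Well name on a short name form where blockname and spaces are removed.
--
--     This should cope with both North Sea style and Haltenbanken style.
--     E.g.: '31/2-G-5 AH' -> 'G-5AH', '6472_11-F-23_AH_T2' -> 'F-23AHT2'
--     Stolen from Xtgeo
--     """
--     newname = []
--     first1 = False
--     first2 = False
--     for letter in wellname:
--         if first1 and first2:
--             newname.append(letter)
--             continue
--         if letter in ("_", "/"):
--             first1 = True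
--             continue
--         if first1 and letter == "-":
--             first2 = True
--             continue
--
--     xname = "".join(newname)
--     xname = xname.replace("_", "")
--     return xname.replace(" ", "")
-- ===== SOURCE B (Python) =====
-- def get_short_wellname(wellname):
--     """Well name on a short name form where blockname and spaces are removed."""
--     i = next((k for k, c in enumerate(wellname) if c in "_/"), None)
--     if i is None:
--         return ""
--     rest = wellname[i + 1:]
--     j = rest.find("-")
--     if j == -1:
--         return ""
--     return rest[j + 1:].replace("_", "").replace(" ", "")
-- ===== Notes on version B (the rewrite author's own statement) =====
-- stated objective: simpler
-- what changed: Replaces A's two-boolean state machine over every character by a direct decomposition: locate the first separator (underscore or slash), find the dash in the remainder, and return the tail after the dash with underscores and spaces removed.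
import Mathlib
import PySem

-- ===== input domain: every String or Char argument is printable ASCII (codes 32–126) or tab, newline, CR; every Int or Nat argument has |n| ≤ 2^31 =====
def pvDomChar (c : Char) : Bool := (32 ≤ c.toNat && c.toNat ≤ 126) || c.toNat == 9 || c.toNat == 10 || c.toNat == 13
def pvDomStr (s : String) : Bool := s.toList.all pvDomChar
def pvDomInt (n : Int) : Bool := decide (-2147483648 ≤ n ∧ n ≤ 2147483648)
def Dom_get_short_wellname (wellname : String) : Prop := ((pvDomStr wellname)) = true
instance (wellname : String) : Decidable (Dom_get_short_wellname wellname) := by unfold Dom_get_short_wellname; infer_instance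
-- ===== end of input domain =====

-- B replaces A's two-flag state machine by a direct decomposition: find the first '_'/'/',
-- find the '-' in the remainder, and clean the tail with two replaces (objective: simpler).

-- ===== PORT A =====
-- one step of A's loop over the letters, state = (newname, first1, first2)
def pvStepA (st : List Char × Bool × Bool) (letter : Char) : List Char × Bool × Bool :=
  if st.2.1 && st.2.2 then (st.1 ++ [letter], st.2.1, st.2.2)
  else if letter = '_' ∨ letter = '/' then (st.1, true, st.2.2)
  else if st.2.1 && (letter == '-') then (st.1, st.2.1, true)
  else st

def get_short_wellname (wellname : String) : String :=
  let st := wellname.toList.foldl pvStepA ([], false, false)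
  let xname := String.ofList st.1   -- "".join(newname)
  PySem.Str.replace (PySem.Str.replace xname "_" "") " " ""

-- ===== PORT B =====
def get_short_wellname_alt (wellname : String) : String :=
  -- next((k for k, c in enumerate(wellname) if c in "_/"), None)
  match wellname.toList.findIdx? (fun c => c == '_' || c == '/') with
  | none => ""
  | some i =>
    let rest := wellname.toList.drop (i + 1)          -- wellname[i+1:]
    let j := PySem.Chars.find rest ['-']              -- rest.find("-")
    if j = -1 then ""
    else String.ofList
      (PySem.Chars.replace (PySem.Chars.replace (rest.drop (j.toNat + 1)) ['_'] []) [' '] [])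

-- ===== PRECONDITION & SPEC =====
def Spec_get_short_wellname (wellname : String) (out : String) : Prop := out = get_short_wellname_alt wellname
instance (wellname : String) (out : String) : Decidable (Spec_get_short_wellname wellname out) := by unfold Spec_get_short_wellname; infer_instance

-- ===== CLAIM (what is proved, stated in full; the proofs are below) =====
def Claim_equal_get_short_wellname : Prop := ∀ (wellname : String), Dom_get_short_wellname wellname → Spec_get_short_wellname wellname (get_short_wellname wellname)

-- ===== LEMMAS AND PROOFS =====

-- in state (true, true) A's loop appends every remaining letter
lemma pv_foldA_tt (cs : List Char) (acc : List Char) :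
    cs.foldl pvStepA (acc, true, true) = (acc ++ cs, true, true) := by
  induction cs generalizing acc with
  | nil => simp
  | cons c t ih => simp [pvStepA, ih]

-- in state (true, false) A's loop waits for the first '-' and then appends the tail
lemma pv_foldA_tf (cs : List Char) (acc : List Char) :
    cs.foldl pvStepA (acc, true, false) =
      if '-' ∈ cs then (acc ++ cs.drop (cs.idxOf '-' + 1), true, true)
      else (acc, true, false) := by
  induction cs generalizing acc with
  | nil => simp
  | cons c t ih =>
    by_cases hc : c = '-'
    · subst hc
      simp [pvStepA, pv_foldA_tt]
    · have hstep : pvStepA (acc, true, false) c = (acc, true, false) := by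
        simp [pvStepA, hc]
      simp only [List.foldl_cons, hstep, ih]
      by_cases hm : '-' ∈ t
      · simp [hm, hc, Ne.symm hc]
      · simp [hm, hc]
        exact Ne.symm hc

-- in state (false, false) A's loop skips letters until the first '_' or '/'
lemma pv_foldA_ff_none (cs : List Char) (acc : List Char)
    (h : cs.findIdx? (fun c => c == '_' || c == '/') = none) :
    cs.foldl pvStepA (acc, false, false) = (acc, false, false) := by
  induction cs generalizing acc with
  | nil => simp
  | cons c t ih =>
    rw [List.findIdx?_cons] at h
    by_cases hc : (c == '_' || c == '/') = true
    · simp [hc] at h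
    · rw [if_neg hc, Option.map_eq_none_iff] at h
      have hstep : pvStepA (acc, false, false) c = (acc, false, false) := by
        simp at hc
        simp [pvStepA, hc]
      simp [hstep, ih _ h]

lemma pv_foldA_ff_some (cs : List Char) (acc : List Char) (i : Nat)
    (h : cs.findIdx? (fun c => c == '_' || c == '/') = some i) :
    cs.foldl pvStepA (acc, false, false) = (cs.drop (i + 1)).foldl pvStepA (acc, true, false) := by
  induction cs generalizing acc i with
  | nil => simp at h
  | cons c t ih =>
    rw [List.findIdx?_cons] at h
    by_cases hc : (c == '_' || c == '/') = true
    · simp [hc] at h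
      have hstep : pvStepA (acc, false, false) c = (acc, true, false) := by
        simp at hc
        rcases hc with hc | hc <;> simp [pvStepA, hc]
      simp [← h, hstep]
    · simp [hc] at h
      obtain ⟨k, hk, rfl⟩ := h
      have hstep : pvStepA (acc, false, false) c = (acc, false, false) := by
        simp at hc
        simp [pvStepA, hc]
      simp [hstep, ih _ _ hk]

-- Chars.find with a single-character pattern is the index of the first occurrence
lemma pv_findGo_singleton (c : Char) (cs : List Char) (k : Nat) :
    PySem.Chars.find.go [c] cs k = if c ∈ cs then ((k + cs.idxOf c : Nat) : Int) else -1 := by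
  induction cs generalizing k with
  | nil => simp [PySem.Chars.find.go]
  | cons x t ih =>
    by_cases hx : c = x
    · subst hx
      simp [PySem.Chars.find.go, List.isPrefixOf]
    · have : ([c].isPrefixOf (x :: t)) = false := by
        simp [List.isPrefixOf]
        exact hx
      rw [PySem.Chars.find.go, this]
      simp only [Bool.false_eq_true, if_false, ih]
      by_cases hm : c ∈ t
      · simp [hm, hx, Ne.symm hx]
        omega
      · simp [hm, hx]

lemma pv_find_singleton (c : Char) (cs : List Char) :
    PySem.Chars.find cs [c] = if c ∈ cs then (cs.idxOf c : Int) else -1 := by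
  unfold PySem.Chars.find
  rw [pv_findGo_singleton]
  simp

-- ===== VERDICT (by name: the statement is the Claim_ definition above) =====
theorem get_short_wellname_spec : Claim_equal_get_short_wellname := by
  intro wellname _
  unfold Spec_get_short_wellname get_short_wellname get_short_wellname_alt
  cases hidx : wellname.toList.findIdx? (fun c => c == '_' || c == '/') with
  | none =>
    simp only [pv_foldA_ff_none _ _ hidx]
    decide
  | some i =>
    simp only [pv_foldA_ff_some _ _ _ hidx, pv_foldA_tf, pv_find_singleton]
    by_cases hm : '-' ∈ wellname.toList.drop (i + 1)
    · simp only [hm, if_true]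
      have : ¬ ((List.idxOf '-' (wellname.toList.drop (i + 1)) : Int) = -1) := by omega
      simp only [this, if_false]
      apply String.toList_inj.mp
      simp
    · simp [hm]
      decide
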